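-- pv_equiv track=rewrite | github.com/eggyy1224/glitch_home | backend/playback_scripts/圖像系譜學/offspring_20250929_114940_017.py | find_siblings
-- ===== SOURCE A (Python) =====
-- from typing import Dict, Iterable, List, Optional, Sequence, Set, Tuple
--
-- def find_siblings(target: str, metadata: Dict[str, dict]) -> List[str]:
--     if target not in metadata:
--         return []
--     t_parents = set(metadata[target].get("parents", []))
--     if not t_parents:
--         return []
--     sibs: List[str] = []
--     for img_name, meta in metadata.items():
--         if img_name == target:
--             continue
--         parents = set(meta.get("parents", []))
--         if parents & t_parents:
--             sibs.append(img_name)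
--     return sibs
-- ===== SOURCE B (Python) =====
-- def find_siblings(target, metadata):
--     if target not in metadata:
--         return []
--     t_parents = set(metadata[target].get("parents", []))
--     if not t_parents:
--         return []
--     index = {}
--     for img_name, meta in metadata.items():
--         for p in meta.get("parents", []):
--             index.setdefault(p, []).append(img_name)
--     members = set()
--     for p in t_parents:
--         members.update(index.get(p, []))
--     return [img for img in metadata if img in members and img != target]
-- ===== Notes on version B (the rewrite author's own statement) =====
-- stated objective: alternative
-- what changed: Replaces the per-entry set-intersection scan by building an inverted parent->children index once, unioning the index buckets of the target's parents into a membership set, and emitting the names with one ordered filter over metadata.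
import Mathlib
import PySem

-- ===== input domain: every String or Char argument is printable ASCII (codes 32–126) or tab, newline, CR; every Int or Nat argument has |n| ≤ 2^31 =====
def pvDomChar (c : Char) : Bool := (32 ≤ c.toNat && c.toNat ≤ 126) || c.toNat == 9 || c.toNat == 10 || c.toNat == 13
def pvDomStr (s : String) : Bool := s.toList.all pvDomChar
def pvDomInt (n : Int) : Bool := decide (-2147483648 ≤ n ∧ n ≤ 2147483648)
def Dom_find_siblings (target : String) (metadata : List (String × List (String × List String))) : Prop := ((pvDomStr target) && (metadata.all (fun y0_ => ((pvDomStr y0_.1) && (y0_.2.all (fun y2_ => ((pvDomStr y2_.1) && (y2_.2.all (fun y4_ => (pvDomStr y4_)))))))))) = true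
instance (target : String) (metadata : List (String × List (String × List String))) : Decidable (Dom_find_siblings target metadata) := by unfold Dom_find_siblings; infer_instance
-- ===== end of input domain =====

-- B replaces A's per-entry set-intersection scan by an inverted parent->children
-- index built once, a union of the target's parents' buckets into a membership set,
-- and one ordered filter over metadata; same return value.

-- ===== PORT A =====
-- meta.get("parents", []) on the assoc-list representation of the inner dict
def pvGetParents (m : List (String × List String)) : List String :=
  match m.find? (fun kv => kv.1 == "parents") with
  | some kv => kv.2
  | none => []

def find_siblings (target : String) (metadata : List (String × List (String × List String))) : List String :=
  match metadata.find? (fun kv => kv.1 == target) with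
  | none => []
  | some tkv =>
    let t_parents : PySem.Set String := PySem.Set.ofList (pvGetParents tkv.2)
    if t_parents.isEmpty then []
    else
      metadata.foldl (fun sibs kv =>
        if kv.1 == target then sibs
        else
          if !(PySem.Set.inter (PySem.Set.ofList (pvGetParents kv.2)) t_parents).isEmpty
          then sibs ++ [kv.1] else sibs) []

-- ===== PORT B =====
def find_siblings_alt (target : String) (metadata : List (String × List (String × List String))) : List String :=
  match metadata.find? (fun kv => kv.1 == target) with
  | none => []
  | some tkv =>
    let t_parents : PySem.Set String := PySem.Set.ofList (pvGetParents tkv.2)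
    if t_parents.isEmpty then []
    else
      let index : PySem.Dict String (List String) :=
        metadata.foldl (fun d kv =>
          (pvGetParents kv.2).foldl (fun d p => d.modify p [] (· ++ [kv.1])) d) PySem.Dict.empty
      let members : PySem.Set String :=
        t_parents.foldl (fun s p => PySem.Set.update s (index.getD p [])) PySem.Set.empty
      (metadata.map (·.1)).filter (fun img => PySem.Set.contains members img && img != target)

-- ===== PRECONDITION & SPEC =====
-- Pre_ excludes association lists with duplicate keys (in metadata or in an inner meta
-- dict): a Python dict cannot carry duplicate keys, so such lists do not faithfully
-- represent A's dict input and any behaviour on them is accidental.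
def Pre_find_siblings (target : String) (metadata : List (String × List (String × List String))) : Prop :=
  (metadata.map (·.1)).Nodup ∧ ∀ kv ∈ metadata, (kv.2.map (·.1)).Nodup
instance (target : String) (metadata : List (String × List (String × List String))) : Decidable (Pre_find_siblings target metadata) := by unfold Pre_find_siblings; infer_instance

def pvWitness_find_siblings : String × (List (String × List (String × List String))) :=
  ("t", [("t", [("parents", ["p"])]), ("x", [("parents", ["p", "q"])]), ("y", [("parents", ["q"])])])

def Spec_find_siblings (target : String) (metadata : List (String × List (String × List String))) (out : List String) : Prop := out = find_siblings_alt target metadata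
instance (target : String) (metadata : List (String × List (String × List String))) (out : List String) : Decidable (Spec_find_siblings target metadata out) := by unfold Spec_find_siblings; infer_instance

-- ===== CLAIM (what is proved, stated in full; the proofs are below) =====
def Claim_equal_find_siblings : Prop := ∀ (target : String) (metadata : List (String × List (String × List String))), Dom_find_siblings target metadata → Pre_find_siblings target metadata → Spec_find_siblings target metadata (find_siblings target metadata)

-- ===== LEMMAS AND PROOFS =====

-- B's nested index-building loop, flattened to one loop over (parent, name) pairs
lemma index_eq_flat (metadata : List (String × List (String × List String))) :
    metadata.foldl (fun d kv =>
        (pvGetParents kv.2).foldl (fun d p => d.modify p [] (· ++ [kv.1])) d)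
      (PySem.Dict.empty : PySem.Dict String (List String)) =
    (metadata.flatMap (fun kv => (pvGetParents kv.2).map (fun p => (p, kv.1)))).foldl
      (fun d q => d.modify q.1 [] (· ++ [q.2])) PySem.Dict.empty := by
  generalize (PySem.Dict.empty : PySem.Dict String (List String)) = d
  induction metadata generalizing d with
  | nil => rfl
  | cons kv rest ih =>
      simp only [List.flatMap_cons, List.foldl_cons, List.foldl_append, List.foldl_map, ih]

-- what any bucket of B's index contains
lemma mem_index_getD (metadata : List (String × List (String × List String)))
    (p x : String) :
    x ∈ (metadata.foldl (fun d kv =>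
          (pvGetParents kv.2).foldl (fun d q => d.modify q [] (· ++ [kv.1])) d)
        (PySem.Dict.empty : PySem.Dict String (List String))).getD p [] ↔
      ∃ kv ∈ metadata, p ∈ pvGetParents kv.2 ∧ kv.1 = x := by
  rw [index_eq_flat, PySem.Dict.getD_foldl_modify_append]
  simp only [PySem.Dict.getD_empty, List.nil_append, List.mem_map, List.mem_filter,
    List.mem_flatMap, beq_iff_eq]
  constructor
  · rintro ⟨q, ⟨⟨kv, hkv, r, hr, rfl⟩, hq1⟩, hq2⟩
    simp only at hq1 hq2
    subst hq1
    exact ⟨kv, hkv, hr, hq2⟩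
  · rintro ⟨kv, hkv, hp, hx⟩
    exact ⟨(p, kv.1), ⟨⟨kv, hkv, p, hp, rfl⟩, rfl⟩, hx⟩

-- what B's members set contains
lemma mem_members_fold (d : PySem.Dict String (List String)) (ps : List String)
    (s : PySem.Set String) (x : String) :
    x ∈ ps.foldl (fun s p => PySem.Set.update s (d.getD p [])) s ↔
      x ∈ s ∨ ∃ p ∈ ps, x ∈ d.getD p [] := by
  induction ps generalizing s with
  | nil => simp
  | cons p rest ih =>
      simp only [List.foldl_cons, ih, PySem.Set.mem_update, List.mem_cons]
      constructor
      · rintro (⟨h | h⟩ | ⟨q, hq, hx⟩)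
        · exact Or.inl h
        · exact Or.inr ⟨p, Or.inl rfl, h⟩
        · exact Or.inr ⟨q, Or.inr hq, hx⟩
      · rintro (h | ⟨q, (rfl | hq), hx⟩)
        · exact Or.inl (Or.inl h)
        · exact Or.inl (Or.inr hx)
        · exact Or.inr ⟨q, hq, hx⟩

-- the two per-entry predicates agree on entries of metadata when keys are Nodup
lemma pred_eq (target : String) (metadata : List (String × List (String × List String)))
    (T : PySem.Set String) (hnd : (metadata.map (·.1)).Nodup)
    (kv : String × List (String × List String)) (hkv : kv ∈ metadata) :
    (!(kv.1 == target) &&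
      !(PySem.Set.inter (PySem.Set.ofList (pvGetParents kv.2)) T).isEmpty) =
    (PySem.Set.contains
        (T.foldl (fun s p => PySem.Set.update s
          ((metadata.foldl (fun d kv =>
              (pvGetParents kv.2).foldl (fun d q => d.modify q [] (· ++ [kv.1])) d)
            (PySem.Dict.empty : PySem.Dict String (List String))).getD p []))
          PySem.Set.empty) kv.1 && kv.1 != target) := by
  rw [Bool.eq_iff_iff]
  simp only [Bool.and_eq_true, Bool.not_eq_true', bne,
    PySem.Set.contains_iff, mem_members_fold, mem_index_getD]
  simp only [List.isEmpty_eq_false_iff_exists_mem, PySem.Set.mem_inter, PySem.Set.mem_ofList,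
    PySem.Set.empty, List.not_mem_nil, false_or]
  constructor
  · rintro ⟨hne, q, hq, hqT⟩
    exact ⟨⟨q, hqT, kv, hkv, hq, rfl⟩, hne⟩
  · rintro ⟨⟨q, hqT, kv', hkv', hq, hfst⟩, hne⟩
    have hk : kv' = kv := List.inj_on_of_nodup_map hnd hkv' hkv hfst
    subst hk
    exact ⟨hne, q, hq, hqT⟩

-- ===== VERDICT (by name: the statement is the Claim_ definition above) =====
theorem find_siblings_spec : Claim_equal_find_siblings := by
  intro target metadata _hdom hpre
  unfold Spec_find_siblings find_siblings find_siblings_alt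
  cases hfind : metadata.find? (fun kv => kv.1 == target) with
  | none => rfl
  | some tkv =>
    simp only
    by_cases hemp : (PySem.Set.ofList (pvGetParents tkv.2)).isEmpty = true
    · simp [hemp]
    · simp only [hemp, Bool.false_eq_true, if_false]
      have hfun : (fun (sibs : List String) (kv : String × List (String × List String)) =>
          if (kv.1 == target) = true then sibs
          else if (!(PySem.Set.inter (PySem.Set.ofList (pvGetParents kv.2))
                (PySem.Set.ofList (pvGetParents tkv.2))).isEmpty) = true
               then sibs ++ [kv.1] else sibs)
          = (fun sibs kv =>
              if ((!(kv.1 == target)) &&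
                  !(PySem.Set.inter (PySem.Set.ofList (pvGetParents kv.2))
                      (PySem.Set.ofList (pvGetParents tkv.2))).isEmpty) = true
              then sibs ++ [kv.1] else sibs) := by
        funext sibs kv
        by_cases h1 : (kv.1 == target) = true <;> simp [h1]
      rw [hfun, PySem.List.foldl_append_if, List.filter_map]
      simp only [List.nil_append]
      exact congrArg (List.map _)
        (List.filter_congr (fun kv hkv =>
          pred_eq target metadata (PySem.Set.ofList (pvGetParents tkv.2)) hpre.1 kv hkv))
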